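-- pv_equiv track=rewrite | github.com/Zswdhy/LeetCode | demo.py | child_sequence
-- ===== SOURCE A (Python) =====
-- def child_sequence(s, index, ans, path):
--     if index == len(s):
--         if path not in ans:
--             ans.append(path)
--     else:
--         choice_1 = path
--         child_sequence(s, index + 1, ans, choice_1)
--         choice_2 = path + s[index]
--         child_sequence(s, index + 1, ans, choice_2)
--     return ans
-- ===== SOURCE B (Python) =====
-- def child_sequence(s, index, ans, path):
--     # Iterative bitmask enumeration of the subsequences of the remaining
--     # characters, in the same skip-before-include order as the recursion.
--     # Mutates ans in place (append), like the original.
--     rem = ''.join(s[i] for i in range(index, len(s)))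
--     n = len(rem)
--     for mask in range(1 << n):
--         cand = path + ''.join(rem[j] for j in range(n) if (mask >> (n - 1 - j)) & 1)
--         if cand not in ans:
--             ans.append(cand)
--     return ans
-- ===== Notes on version B (the rewrite author's own statement) =====
-- stated objective: alternative
-- what changed: Replaces the binary recursion (skip/include DFS) by a single iterative loop over bitmasks 0..2^n-1 that builds each candidate subsequence directly (MSB-first bit = first remaining character), keeping the same enumeration order and the same in-place membership-dedup append to ans.
import Mathlib
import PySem

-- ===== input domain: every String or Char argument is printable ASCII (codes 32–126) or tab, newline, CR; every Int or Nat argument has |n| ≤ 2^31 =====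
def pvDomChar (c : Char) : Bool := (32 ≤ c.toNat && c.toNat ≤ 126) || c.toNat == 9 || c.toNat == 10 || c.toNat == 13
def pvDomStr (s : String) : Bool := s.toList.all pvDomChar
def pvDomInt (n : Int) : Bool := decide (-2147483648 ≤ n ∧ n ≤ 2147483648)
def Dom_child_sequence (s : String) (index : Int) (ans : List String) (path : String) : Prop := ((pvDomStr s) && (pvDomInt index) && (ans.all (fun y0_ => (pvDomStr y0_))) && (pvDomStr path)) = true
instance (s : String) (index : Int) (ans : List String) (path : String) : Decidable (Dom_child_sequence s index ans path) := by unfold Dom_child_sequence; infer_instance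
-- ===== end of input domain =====

-- B replaces A's skip/include binary recursion by one iterative loop over bitmasks that
-- builds each candidate subsequence directly, in the same order, with the same in-place
-- dedup-append to ans (the mutation of ans is reproduced by B); alternative, not faster.

-- ===== PORT A =====
-- the recursive body of A, on the character list of s (path accumulated as List Char);
-- the final 'else ans' branch is only a totality guard: Python diverges for index > len(s),
-- which Pre_ excludes.
def pvChildA (cs : List Char) (index : Int) (ans : List String) (path : List Char) : List String :=
  if index = (cs.length : Int) then
    if String.ofList path ∈ ans then ans else ans ++ [String.ofList path]
  else if _h : index < (cs.length : Int) then
    let choice1 := path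
    let ans1 := pvChildA cs (index + 1) ans choice1
    let choice2 := path ++ [PySem.List.pyGetD cs index ' ']   -- s[index]; in range under Pre_
    pvChildA cs (index + 1) ans1 choice2
  else ans
termination_by ((cs.length : Int) - index).toNat
decreasing_by all_goals omega

def child_sequence (s : String) (index : Int) (ans : List String) (path : String) : List String :=
  pvChildA s.toList index ans path.toList

-- ===== PORT B =====
-- ''.join(rem[j] for j in range(n) if (mask >> (n-1-j)) & 1)  as a List Char
def pvSel (rem : List Char) (mask : Nat) : List Char :=
  (List.range rem.length).filterMap
    (fun j => if (mask >>> (rem.length - 1 - j)) &&& 1 == 1 then some (rem.getD j ' ') else none)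

def child_sequence_alt (s : String) (index : Int) (ans : List String) (path : String) : List String :=
  let cs := s.toList
  -- rem = ''.join(s[i] for i in range(index, len(s)))
  let rem := (PySem.List.pyRange index (cs.length : Int) 1).map (fun i => PySem.List.pyGetD cs i ' ')
  let n := rem.length
  (List.range (2 ^ n)).foldl
    (fun acc mask =>
      let cand := String.ofList (path.toList ++ pvSel rem mask)
      if cand ∈ acc then acc else acc ++ [cand])
    ans

-- ===== PRECONDITION & SPEC =====
-- Pre_ is exactly where Python A returns: for index > len(s) A recurses forever
-- (RecursionError) and for index < -len(s) it raises IndexError.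
def Pre_child_sequence (s : String) (index : Int) (ans : List String) (path : String) : Prop :=
  -(PySem.Str.len s) ≤ index ∧ index ≤ PySem.Str.len s
instance (s : String) (index : Int) (ans : List String) (path : String) : Decidable (Pre_child_sequence s index ans path) := by unfold Pre_child_sequence; infer_instance

def pvWitness_child_sequence : String × Int × List String × String := ("ab", 0, ["b"], "")

def Spec_child_sequence (s : String) (index : Int) (ans : List String) (path : String) (out : List String) : Prop := out = child_sequence_alt s index ans path
instance (s : String) (index : Int) (ans : List String) (path : String) (out : List String) : Decidable (Spec_child_sequence s index ans path out) := by unfold Spec_child_sequence; infer_instance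

-- ===== CLAIM (what is proved, stated in full; the proofs are below) =====
def Claim_equal_child_sequence : Prop := ∀ (s : String) (index : Int) (ans : List String) (path : String), Dom_child_sequence s index ans path → Pre_child_sequence s index ans path → Spec_child_sequence s index ans path (child_sequence s index ans path)


-- ===== LEMMAS AND PROOFS =====

-- the leaves of A's recursion tree over the remaining characters, in DFS (skip-first) order
def pvLeaves : List Char → List Char → List String
  | [], path => [String.ofList path]
  | c :: cs, path => pvLeaves cs path ++ pvLeaves cs (path ++ [c])

-- the shared dedup-append fold
def pvDedup (ans : List String) (l : List String) : List String :=
  l.foldl (fun acc x => if x ∈ acc then acc else acc ++ [x]) ans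

-- remaining characters s[index], …, s[len-1]
def pvRem (cs : List Char) (index : Int) : List Char :=
  (PySem.List.pyRange index (cs.length : Int) 1).map (fun i => PySem.List.pyGetD cs i ' ')

lemma pvDedup_append (ans : List String) (l1 l2 : List String) :
    pvDedup ans (l1 ++ l2) = pvDedup (pvDedup ans l1) l2 := by
  simp [pvDedup, List.foldl_append]

lemma pvRem_nil (cs : List Char) (index : Int) (h : (cs.length : Int) ≤ index) :
    pvRem cs index = [] := by
  simp [pvRem, PySem.List.pyRange_one_eq_nil h]

lemma pvRem_cons (cs : List Char) (index : Int) (h : index < (cs.length : Int)) :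
    pvRem cs index = PySem.List.pyGetD cs index ' ' :: pvRem cs (index + 1) := by
  simp [pvRem, PySem.List.pyRange_one_cons h]

lemma pvChildA_eq (cs : List Char) (k : Nat) :
    ∀ (index : Int) (ans : List String) (path : List Char),
      index ≤ (cs.length : Int) → ((cs.length : Int) - index).toNat = k →
      pvChildA cs index ans path = pvDedup ans (pvLeaves (pvRem cs index) path) := by
  induction k with
  | zero =>
    intro index ans path h1 hk
    have hi : index = (cs.length : Int) := by omega
    rw [pvChildA, if_pos hi, pvRem_nil cs index (le_of_eq hi.symm)]
    simp [pvLeaves, pvDedup]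
  | succ k ih =>
    intro index ans path h1 hk
    have hlt : index < (cs.length : Int) := by omega
    have hne : ¬ index = (cs.length : Int) := by omega
    rw [pvChildA, if_neg hne, dif_pos hlt]
    show pvChildA cs (index + 1) (pvChildA cs (index + 1) ans path)
        (path ++ [PySem.List.pyGetD cs index ' ']) = _
    rw [pvRem_cons cs index hlt]
    rw [pvLeaves, pvDedup_append]
    rw [ih (index + 1) ans path (by omega) (by omega),
        ih (index + 1) _ (path ++ [PySem.List.pyGetD cs index ' ']) (by omega) (by omega)]

lemma pvBit_low (n k m : Nat) (hk : k ≤ n) :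
    (2 ^ n + m) >>> k = 2 ^ (n - k) + (m >>> k) := by
  have h2 : 2 ^ n = 2 ^ k * 2 ^ (n - k) := by
    rw [← pow_add]; congr 1; omega
  simp only [Nat.shiftRight_eq_div_pow]
  rw [h2, Nat.mul_add_div (Nat.pow_pos (by norm_num))]

lemma pvBit_high (n k m : Nat) (hk : k < n) :
    ((2 ^ n + m) >>> k) &&& 1 = (m >>> k) &&& 1 := by
  rw [pvBit_low n k m (by omega)]
  have h1 : 2 ^ (n - k) = 2 * 2 ^ (n - k - 1) := by
    rw [← pow_succ']; congr 1; omega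
  simp only [Nat.and_one_is_mod, h1, Nat.mul_add_mod]

lemma pvBit_top (n m : Nat) (hm : m < 2 ^ n) :
    (2 ^ n + m) >>> n = 1 := by
  rw [pvBit_low n n m le_rfl]
  simp [Nat.shiftRight_eq_div_pow, Nat.div_eq_of_lt hm]

lemma pvSel_low (c : Char) (cs : List Char) (m : Nat) (hm : m < 2 ^ cs.length) :
    pvSel (c :: cs) m = pvSel cs m := by
  have htop : m >>> cs.length = 0 := by
    simp [Nat.shiftRight_eq_div_pow, Nat.div_eq_of_lt hm]
  unfold pvSel
  rw [List.length_cons, List.range_succ_eq_map, List.filterMap_cons]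
  simp only [Nat.add_sub_cancel, Nat.sub_zero, htop, Nat.zero_and, List.filterMap_map]
  simp only [show ((0 : Nat) == 1) = false from rfl, Bool.false_eq_true, if_false]
  apply List.filterMap_congr
  intro j hj
  have hj' : j < cs.length := List.mem_range.mp hj
  have h1 : cs.length - (j + 1) = cs.length - 1 - j := by omega
  simp [Nat.succ_eq_add_one, h1]

lemma pvSel_high (c : Char) (cs : List Char) (m : Nat) (hm : m < 2 ^ cs.length) :
    pvSel (c :: cs) (2 ^ cs.length + m) = c :: pvSel cs m := by
  have htop := pvBit_top cs.length m hm
  unfold pvSel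
  rw [List.length_cons, List.range_succ_eq_map, List.filterMap_cons]
  simp only [Nat.add_sub_cancel, Nat.sub_zero, htop, List.filterMap_map]
  simp only [show ((1 : Nat) &&& 1 == 1) = true from rfl, if_true, List.getD_cons_zero]
  congr 1
  apply List.filterMap_congr
  intro j hj
  have hj' : j < cs.length := List.mem_range.mp hj
  have h1 : cs.length - (j + 1) = cs.length - 1 - j := by omega
  have h2 := pvBit_high cs.length (cs.length - 1 - j) m (by omega)
  simp only [Nat.and_one_is_mod] at h2
  simp [Nat.succ_eq_add_one, h1, h2]

lemma pvMasks_eq (rem : List Char) :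
    ∀ (path : List Char),
      (List.range (2 ^ rem.length)).map (fun mask => String.ofList (path ++ pvSel rem mask))
        = pvLeaves rem path := by
  induction rem with
  | nil => intro path; simp [pvSel, pvLeaves]
  | cons c cs ih =>
    intro path
    have hsplit : 2 ^ (c :: cs).length = 2 ^ cs.length + 2 ^ cs.length := by
      simp [List.length_cons, pow_succ]; ring
    rw [hsplit, List.range_add, List.map_append, List.map_map]
    have h1 : (List.range (2 ^ cs.length)).map (fun mask => String.ofList (path ++ pvSel (c :: cs) mask))
        = pvLeaves cs path := by
      rw [← ih path]
      apply List.map_congr_left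
      intro m hm
      rw [pvSel_low c cs m (List.mem_range.mp hm)]
    have h2 : (List.range (2 ^ cs.length)).map
          ((fun mask => String.ofList (path ++ pvSel (c :: cs) mask)) ∘ (fun i => 2 ^ cs.length + i))
        = pvLeaves cs (path ++ [c]) := by
      rw [← ih (path ++ [c])]
      apply List.map_congr_left
      intro m hm
      simp only [Function.comp_apply]
      rw [pvSel_high c cs m (List.mem_range.mp hm)]
      simp
    rw [h1, h2, pvLeaves]

lemma pvAlt_eq (s : String) (index : Int) (ans : List String) (path : String) :
    child_sequence_alt s index ans path
      = pvDedup ans (pvLeaves (pvRem s.toList index) path.toList) := by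
  rw [child_sequence_alt]
  rw [← pvMasks_eq (pvRem s.toList index) path.toList]
  simp only [pvDedup, List.foldl_map, pvRem]

-- ===== VERDICT (by name: the statement is the Claim_ definition above) =====
theorem child_sequence_spec : Claim_equal_child_sequence := by
  intro s index ans path _hD hP
  obtain ⟨h1, h2⟩ := hP
  have hlen : PySem.Str.len s = (s.toList.length : Int) := by simp
  rw [hlen] at h1 h2
  show child_sequence s index ans path = child_sequence_alt s index ans path
  rw [child_sequence, pvAlt_eq,
    pvChildA_eq s.toList ((s.toList.length : Int) - index).toNat index ans path.toList h2 rfl]
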